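-- pv_equiv track=rewrite | github.com/zhihuiLiang/obs_detect | scripts/detect.py | sortedPoints
-- ===== SOURCE A (Python) =====
-- def sortedPoints(points):
--     length = []
--     for i, p in enumerate(points):
--         p2 = points[(i + 1) % 4]
--         dist = (p[0] - p2[0]) * (p[0] - p2[0]) + (p[1] - p2[1]) * (p[1] -
--                                                                    p2[1])
--         length.append([dist, i])
--     length = sorted(length, key=lambda l: l[0])
--     sorted_points = []
--     shortest_index = length[0][1]
--     for _ in range(4):
--         sorted_points.append(points[shortest_index % 4])
--         shortest_index += 1
--     return sorted_points
-- ===== SOURCE B (Python) =====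
-- def sortedPoints(points):
--     n = len(points)
--
--     def edge(i):
--         p, q = points[i], points[(i + 1) % 4]
--         return (p[0] - q[0]) * (p[0] - q[0]) + (p[1] - q[1]) * (p[1] - q[1])
--
--     best = 0
--     for i in range(1, n):
--         if edge(i) < edge(best):
--             best = i
--     return [points[(best + k) % 4] for k in range(4)]
-- ===== Notes on version B (the rewrite author's own statement) =====
-- stated objective: simpler
-- what changed: B drops A's intermediate [dist,index] list and stable sort, finding the shortest-edge index with a single best-so-far linear scan and emitting the four points directly with (best+k)%4.
import Mathlib
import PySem

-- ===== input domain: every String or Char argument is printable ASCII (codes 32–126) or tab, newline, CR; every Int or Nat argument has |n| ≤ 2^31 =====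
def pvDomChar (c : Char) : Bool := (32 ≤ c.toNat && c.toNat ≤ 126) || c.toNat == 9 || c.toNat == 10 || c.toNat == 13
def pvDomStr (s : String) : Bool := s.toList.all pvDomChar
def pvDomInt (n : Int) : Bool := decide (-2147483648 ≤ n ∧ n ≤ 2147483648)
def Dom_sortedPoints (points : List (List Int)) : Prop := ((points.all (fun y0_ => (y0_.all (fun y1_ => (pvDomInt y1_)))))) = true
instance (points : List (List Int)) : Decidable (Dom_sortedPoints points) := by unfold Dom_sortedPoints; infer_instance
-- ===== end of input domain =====

-- B replaces A's build-a-[dist,i]-list-and-sort scan with a single best-so-far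
-- linear scan for the shortest edge (simpler, no intermediate list, no sort).

-- ===== PORT A =====
def sortedPoints (points : List (List Int)) : List (List Int) :=
  let length := (PySem.List.enumerate points).foldl
    (fun acc ip =>
      let i := ip.1
      let p := ip.2
      let p2 := PySem.List.pyGetD points (PySem.Int.mod (i + 1) 4) []
      let dist := (PySem.List.pyGetD p 0 0 - PySem.List.pyGetD p2 0 0) *
                    (PySem.List.pyGetD p 0 0 - PySem.List.pyGetD p2 0 0) +
                  (PySem.List.pyGetD p 1 0 - PySem.List.pyGetD p2 1 0) *
                    (PySem.List.pyGetD p 1 0 - PySem.List.pyGetD p2 1 0)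
      acc ++ [[dist, i]]) []
  let length2 := PySem.List.sorted length (fun l => PySem.List.pyGetD l 0 0) false
  let shortest_index := PySem.List.pyGetD (PySem.List.pyGetD length2 0 []) 1 0
  let res := (PySem.List.pyRange 0 4 1).foldl
    (fun (st : List (List Int) × Int) _ =>
      (st.1 ++ [PySem.List.pyGetD points (PySem.Int.mod st.2 4) []], st.2 + 1))
    ([], shortest_index)
  res.1

-- ===== PORT B =====
-- squared length of the edge from points[i] to points[(i+1) % 4]  (B's helper `edge`)
def pvEdge (points : List (List Int)) (i : Int) : Int :=
  let p := PySem.List.pyGetD points i []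
  let q := PySem.List.pyGetD points (PySem.Int.mod (i + 1) 4) []
  (PySem.List.pyGetD p 0 0 - PySem.List.pyGetD q 0 0) *
    (PySem.List.pyGetD p 0 0 - PySem.List.pyGetD q 0 0) +
  (PySem.List.pyGetD p 1 0 - PySem.List.pyGetD q 1 0) *
    (PySem.List.pyGetD p 1 0 - PySem.List.pyGetD q 1 0)

def sortedPoints_alt (points : List (List Int)) : List (List Int) :=
  let n := PySem.List.len points
  let best := (PySem.List.pyRange 1 n 1).foldl
    (fun b i => if pvEdge points i < pvEdge points b then i else b) 0
  (PySem.List.pyRange 0 4 1).map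
    (fun k => PySem.List.pyGetD points (PySem.Int.mod (best + k) 4) [])

-- ===== PRECONDITION & SPEC =====
-- Pre_: Python A raises IndexError when there are fewer than 4 points or some point
-- has fewer than 2 coordinates; exactly those inputs are excluded.
def Pre_sortedPoints (points : List (List Int)) : Prop :=
  4 ≤ points.length ∧ ∀ p ∈ points, 2 ≤ p.length
instance (points : List (List Int)) : Decidable (Pre_sortedPoints points) := by
  unfold Pre_sortedPoints; infer_instance

def pvWitness_sortedPoints : List (List Int) := [[0, 0], [0, 3], [2, 3], [2, 0]]

def Spec_sortedPoints (points : List (List Int)) (out : List (List Int)) : Prop := out = sortedPoints_alt points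
instance (points : List (List Int)) (out : List (List Int)) : Decidable (Spec_sortedPoints points out) := by unfold Spec_sortedPoints; infer_instance

-- ===== CLAIM (what is proved, stated in full; the proofs are below) =====
def Claim_equal_sortedPoints : Prop := ∀ (points : List (List Int)), Dom_sortedPoints points → Pre_sortedPoints points → Spec_sortedPoints points (sortedPoints points)

-- ===== LEMMAS AND PROOFS =====

lemma pv_insertBy_head? {α : Type} (before : α → α → Bool) (x y : α) (ys : List α) :
    (PySem.List.insertBy before x (y :: ys)).head? =
      some (if before x y then x else y) := by
  cases h : before x y <;> simp [PySem.List.insertBy, h]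

lemma pv_sorted_singleton {α : Type} (key : α → Int) (x : α) :
    PySem.List.sorted [x] key false = [x] := by
  rw [PySem.List.sorted_eq_foldl_insertBy]
  simp [PySem.List.insertBy]

lemma pv_sorted_append_singleton {α : Type} (xs : List α) (y : α) (key : α → Int) :
    PySem.List.sorted (xs ++ [y]) key false =
      PySem.List.insertBy (fun a b => decide (key a < key b)) y
        (PySem.List.sorted xs key false) := by
  rw [PySem.List.sorted_eq_foldl_insertBy, PySem.List.sorted_eq_foldl_insertBy,
    List.foldl_append]
  rfl

-- head of Python's stable sort = the first-minimum best-so-far fold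
lemma pv_head?_sorted_cons {α : Type} (key : α → Int) (x : α) (xs : List α) :
    (PySem.List.sorted (x :: xs) key false).head? =
      some (xs.foldl (fun b y => if key y < key b then y else b) x) := by
  induction xs using List.reverseRecOn with
  | nil => simp [pv_sorted_singleton]
  | append_singleton ys y ih =>
    have h1 : x :: (ys ++ [y]) = (x :: ys) ++ [y] := by simp
    rw [h1, pv_sorted_append_singleton]
    cases h : PySem.List.sorted (x :: ys) key false with
    | nil =>
      exact absurd ((PySem.List.sorted_eq_nil_iff _ _ _).1 h) (by simp)
    | cons m t =>
      rw [h] at ih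
      simp only [List.head?_cons, Option.some.injEq] at ih
      rw [pv_insertBy_head?, List.foldl_append, ← ih]
      simp only [List.foldl_cons, List.foldl_nil]
      by_cases hc : key y < key m <;> simp [hc]

-- the best-so-far fold over mapped elements is the image of the index fold
lemma pv_foldl_argmin_map (g : Int → List Int) (key : List Int → Int)
    (edge : Int → Int) (h : ∀ j, key (g j) = edge j) (l : List Int) (b : Int) :
    l.foldl (fun (acc : List Int) (j : Int) => if key (g j) < key acc then g j else acc) (g b) =
      g (l.foldl (fun acc i => if edge i < edge acc then i else acc) b) := by
  induction l generalizing b with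
  | nil => rfl
  | cons i l ih =>
    simp only [List.foldl_cons]
    by_cases hc : edge i < edge b
    · rw [if_pos (by rw [h, h]; exact hc), if_pos hc]; exact ih i
    · rw [if_neg (by rw [h, h]; exact hc), if_neg hc]; exact ih b

lemma pv_main (points : List (List Int)) (h : Pre_sortedPoints points) :
    sortedPoints points = sortedPoints_alt points := by
  obtain ⟨hlen, -⟩ := h
  unfold sortedPoints sortedPoints_alt
  rw [PySem.List.foldl_append_singleton_eq_map
        (fun ip : Int × List Int =>
          [(PySem.List.pyGetD ip.2 0 0 -
              PySem.List.pyGetD (PySem.List.pyGetD points (PySem.Int.mod (ip.1 + 1) 4) []) 0 0) *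
             (PySem.List.pyGetD ip.2 0 0 -
              PySem.List.pyGetD (PySem.List.pyGetD points (PySem.Int.mod (ip.1 + 1) 4) []) 0 0) +
           (PySem.List.pyGetD ip.2 1 0 -
              PySem.List.pyGetD (PySem.List.pyGetD points (PySem.Int.mod (ip.1 + 1) 4) []) 1 0) *
             (PySem.List.pyGetD ip.2 1 0 -
              PySem.List.pyGetD (PySem.List.pyGetD points (PySem.Int.mod (ip.1 + 1) 4) []) 1 0),
           ip.1]),
      PySem.List.enumerate_eq_map_pyRange points [], List.map_map]
  have hmapeq :
      ((fun ip : Int × List Int =>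
          [(PySem.List.pyGetD ip.2 0 0 -
              PySem.List.pyGetD (PySem.List.pyGetD points (PySem.Int.mod (ip.1 + 1) 4) []) 0 0) *
             (PySem.List.pyGetD ip.2 0 0 -
              PySem.List.pyGetD (PySem.List.pyGetD points (PySem.Int.mod (ip.1 + 1) 4) []) 0 0) +
           (PySem.List.pyGetD ip.2 1 0 -
              PySem.List.pyGetD (PySem.List.pyGetD points (PySem.Int.mod (ip.1 + 1) 4) []) 1 0) *
             (PySem.List.pyGetD ip.2 1 0 -
              PySem.List.pyGetD (PySem.List.pyGetD points (PySem.Int.mod (ip.1 + 1) 4) []) 1 0),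
           ip.1]) ∘
        (fun j => (j, PySem.List.pyGetD points j []))) =
      fun j => [pvEdge points j, j] := by
    funext j; simp [pvEdge]
  rw [hmapeq]
  have hn : (0 : Int) < PySem.List.len points := by
    simp [PySem.List.len_eq]; omega
  rw [PySem.List.pyRange_one_cons hn]
  have h01 : (0 : Int) + 1 = 1 := by norm_num
  rw [h01, List.map_cons]
  set l := PySem.List.pyRange 1 (PySem.List.len points) 1 with hl
  have hhead := pv_head?_sorted_cons (fun l => PySem.List.pyGetD l 0 0)
    ([pvEdge points 0, 0]) (l.map (fun j => [pvEdge points j, j]))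
  rw [List.foldl_map] at hhead
  have hfold := pv_foldl_argmin_map (fun j => [pvEdge points j, j])
    (fun l => PySem.List.pyGetD l 0 0) (pvEdge points)
    (fun j => by simp) l 0
  rw [hfold] at hhead
  set best := l.foldl (fun acc i => if pvEdge points i < pvEdge points acc then i else acc) 0
    with hbest
  obtain ⟨t, hs⟩ : ∃ t,
      PySem.List.sorted ([pvEdge points 0, 0] :: l.map (fun j => [pvEdge points j, j]))
        (fun l => PySem.List.pyGetD l 0 0) false = [pvEdge points best, best] :: t := by
    cases h' : PySem.List.sorted ([pvEdge points 0, 0] :: l.map (fun j => [pvEdge points j, j]))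
        (fun l => PySem.List.pyGetD l 0 0) false with
    | nil => rw [h'] at hhead; simp at hhead
    | cons m t =>
      rw [h'] at hhead
      simp only [List.head?_cons, Option.some.injEq] at hhead
      exact ⟨t, by rw [hhead]⟩
  simp only [List.nil_append]
  rw [hs]
  have hsi : PySem.List.pyGetD
      (PySem.List.pyGetD ([pvEdge points best, best] :: t) 0 []) 1 0 = best := by
    rw [PySem.List.pyGetD_zero_cons, PySem.List.pyGetD_ofNat']
    rfl
  rw [hsi]
  have hr4 : PySem.List.pyRange 0 4 1 = [0, 1, 2, 3] := rfl
  rw [hr4]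
  simp only [List.foldl_cons, List.foldl_nil, List.map_cons, List.map_nil, List.nil_append,
    List.cons_append]
  have e0 : best + 1 + 1 = best + 2 := by ring
  rw [e0]
  have e2 : best + 2 + 1 = best + 3 := by ring
  rw [e2]
  simp only [add_zero]
  rfl

-- ===== VERDICT (by name: the statement is the Claim_ definition above) =====
theorem sortedPoints_spec : Claim_equal_sortedPoints := by
  intro points _ hpre
  unfold Spec_sortedPoints
  exact (pv_main points hpre).symm ▸ rfl
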